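-- pv_equiv track=rewrite | github.com/ksaigon/ksaigon-advent-of-code-2025 | day06/day6.py | do_cephalopods_hw
-- ===== SOURCE A (Python) =====
-- import operator
--
-- def do_cephalopods_hw(grid):
--     m, n = len(grid), len(grid[0])
--     op_map = {"+": operator.add, "*": operator.mul}
--     total_ans = 0
--     for col in range(n):
--         op = op_map[grid[-1][col]]
--         col_ans = int(grid[0][col])
--         for row in range(1, m-1):
--             col_ans = op(col_ans, int(grid[row][col]))
--         total_ans += col_ans
--     return total_ans
-- ===== SOURCE B (Python) =====
-- def do_cephalopods_hw(grid):
--     ops = grid[-1]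
--     acc = [int(x) for x in grid[0]]
--     for row in grid[1:-1]:
--         acc = [a + int(x) if o == "+" else a * int(x)
--                for a, x, o in zip(acc, row, ops)]
--     return sum(acc)
-- ===== Notes on version B (the rewrite author's own statement) =====
-- stated objective: alternative
-- what changed: B makes a single row-major streaming pass: it keeps a vector of per-column accumulators seeded from row 0 and updates all of them elementwise (via zip with the operator row) as each middle row arrives, summing the vector at the end, instead of A's column-major nested scan that finishes one column before touching the next.
import Mathlib
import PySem

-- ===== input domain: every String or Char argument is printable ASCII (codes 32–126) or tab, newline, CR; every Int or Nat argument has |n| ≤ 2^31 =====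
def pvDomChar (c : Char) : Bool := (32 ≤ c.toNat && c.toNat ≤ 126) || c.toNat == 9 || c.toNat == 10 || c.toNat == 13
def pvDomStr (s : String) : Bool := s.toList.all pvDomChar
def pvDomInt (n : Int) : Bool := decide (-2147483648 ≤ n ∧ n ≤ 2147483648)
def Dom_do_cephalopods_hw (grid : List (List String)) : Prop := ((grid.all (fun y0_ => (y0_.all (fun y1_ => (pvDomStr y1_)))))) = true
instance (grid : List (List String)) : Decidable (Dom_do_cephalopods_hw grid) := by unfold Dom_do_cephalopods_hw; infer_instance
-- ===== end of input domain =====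

-- B replaces A's column-major nested scan with a single row-major streaming pass over
-- a vector of per-column accumulators, updated elementwise per row; same cost,
-- different traversal order and state.

-- ===== PORT A =====
def do_cephalopods_hw (grid : List (List String)) : Int :=
  let m : Int := grid.length
  let n : Int := (PySem.List.pyGetD grid 0 []).length
  (PySem.List.pyRange 0 n).foldl (fun total col =>
    let isAdd := PySem.List.pyGetD (PySem.List.pyGetD grid (-1) []) col "" = "+"
    let colInit := (PySem.Int.ofStr? (PySem.List.pyGetD (PySem.List.pyGetD grid 0 []) col "")).getD 0
    let colAns := (PySem.List.pyRange 1 (m - 1)).foldl (fun acc row =>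
      let v := (PySem.Int.ofStr? (PySem.List.pyGetD (PySem.List.pyGetD grid row []) col "")).getD 0
      if isAdd then acc + v else acc * v) colInit
    total + colAns) 0

-- ===== PORT B =====
-- ops = grid[-1]; acc = row 0 parsed; for each middle row update every accumulator
-- elementwise via zip(acc, row, ops); return sum(acc).
def do_cephalopods_hw_alt (grid : List (List String)) : Int :=
  let ops := PySem.List.pyGetD grid (-1) []
  let acc0 := (PySem.List.pyGetD grid 0 []).map (fun x => (PySem.Int.ofStr? x).getD 0)
  let acc := (PySem.List.slice grid (some 1) (some (-1))).foldl
    (fun acc row =>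
      (acc.zip (row.zip ops)).map (fun p =>
        if p.2.2 = "+" then p.1 + (PySem.Int.ofStr? p.2.1).getD 0
        else p.1 * (PySem.Int.ofStr? p.2.1).getD 0))
    acc0
  acc.sum

-- ===== PRECONDITION & SPEC =====
-- Pre_ = exactly the inputs where A returns: the grid is nonempty, every row reaches the
-- width of row 0, the first n entries of the last row are "+"/"*", and the first n entries
-- of every other row (and of row 0) parse as ints; otherwise A raises
-- (IndexError/KeyError/ValueError).
def Pre_do_cephalopods_hw (grid : List (List String)) : Prop :=
  grid ≠ [] ∧
  (grid.headD []).length ≤ (grid.getLastD []).length ∧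
  (∀ s ∈ (grid.getLastD []).take (grid.headD []).length, s = "+" ∨ s = "*") ∧
  (∀ row ∈ grid.dropLast, (grid.headD []).length ≤ row.length ∧
      ∀ s ∈ row.take (grid.headD []).length, (PySem.Int.ofStr? s).isSome = true) ∧
  (∀ s ∈ grid.headD [], (PySem.Int.ofStr? s).isSome = true)
instance (grid : List (List String)) : Decidable (Pre_do_cephalopods_hw grid) := by
  unfold Pre_do_cephalopods_hw; infer_instance

def pvWitness_do_cephalopods_hw : List (List String) :=
  [["1", "2"], ["3", "4"], ["+", "*"]]

def Spec_do_cephalopods_hw (grid : List (List String)) (out : Int) : Prop := out = do_cephalopods_hw_alt grid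
instance (grid : List (List String)) (out : Int) : Decidable (Spec_do_cephalopods_hw grid out) := by unfold Spec_do_cephalopods_hw; infer_instance

-- ===== CLAIM (what is proved, stated in full; the proofs are below) =====
def Claim_equal_do_cephalopods_hw : Prop := ∀ (grid : List (List String)), Dom_do_cephalopods_hw grid → Pre_do_cephalopods_hw grid → Spec_do_cephalopods_hw grid (do_cephalopods_hw grid)

-- ===== LEMMAS AND PROOFS =====

theorem pv_pyGetD_neg_one {α : Type} (l : List α) (d : α) (h : l ≠ []) :
    PySem.List.pyGetD l (-1) d = l.getLastD d := by
  have hlen : 0 < l.length := List.length_pos_iff.mpr h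
  simp only [PySem.List.pyGetD, PySem.List.pyGet?, PySem.List.pyIdx?]
  have h1 : ¬ (0 : Int) ≤ -1 := by omega
  have h2 : -(l.length : Int) ≤ -1 := by omega
  simp only [if_neg h1, if_pos h2]
  rw [List.getLastD_eq_getLast?, List.getLast?_eq_getElem?]
  simp

-- (x :: l)[1:-1] = l without its last element
theorem pv_slice_one_negone {α : Type} (x : α) (l : List α) :
    PySem.List.slice (x :: l) (some 1) (some (-1)) = l.dropLast := by
  simp only [PySem.List.slice, PySem.List.clampIdx, List.length_cons]
  split_ifs with ha hb <;> push_cast at * <;> try omega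
  · cases l with
    | nil => rfl
    | cons y t =>
      have h2 : ((↑(y :: t).length : Int) + 1 + -1).toNat = (y :: t).length := by
        simp
      rw [h2]
      have h3 : min 1 ((y :: t).length + 1) = 1 := by omega
      rw [h3]
      simp [List.dropLast_eq_take]
  · exact absurd trivial ha

-- l.map f written as a map over the index range
theorem pv_map_eq_range {α β : Type} (l : List α) (f : α → β) (d : α) :
    l.map f = (List.range l.length).map (fun c => f (l.getD c d)) := by
  apply List.ext_getElem
  · simp
  · intro i h1 h2
    simp only [List.getElem_map, List.getElem_range]
    rw [List.getD_eq_getElem l d (by simpa using h1)]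

-- one elementwise row update, on an accumulator given as a map over the index range
theorem pv_step_range (n : Nat) (g : Nat → Int) (row ops : List String)
    (hr : n ≤ row.length) (ho : n ≤ ops.length) :
    (((List.range n).map g).zip (row.zip ops)).map (fun p =>
        if p.2.2 = "+" then p.1 + (PySem.Int.ofStr? p.2.1).getD 0
        else p.1 * (PySem.Int.ofStr? p.2.1).getD 0)
      = (List.range n).map (fun c =>
          if ops.getD c "" = "+" then g c + (PySem.Int.ofStr? (row.getD c "")).getD 0
          else g c * (PySem.Int.ofStr? (row.getD c "")).getD 0) := by
  apply List.ext_getElem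
  · simp; omega
  · intro i h1 h2
    have hi : i < n := by simpa using h2
    simp only [List.getElem_map, List.getElem_zip, List.getElem_range]
    rw [List.getD_eq_getElem ops "" (by omega), List.getD_eq_getElem row "" (by omega)]

-- the row-major streaming pass computes the per-column folds
theorem pv_stream_eq_cols (ops : List String) (mid : List (List String)) (n : Nat)
    (hmid : ∀ row ∈ mid, n ≤ row.length) (ho : n ≤ ops.length) :
    ∀ g : Nat → Int,
    mid.foldl (fun acc row =>
        (acc.zip (row.zip ops)).map (fun p =>
          if p.2.2 = "+" then p.1 + (PySem.Int.ofStr? p.2.1).getD 0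
          else p.1 * (PySem.Int.ofStr? p.2.1).getD 0))
      ((List.range n).map g)
    = (List.range n).map (fun c =>
        mid.foldl (fun a row =>
          if ops.getD c "" = "+" then a + (PySem.Int.ofStr? (row.getD c "")).getD 0
          else a * (PySem.Int.ofStr? (row.getD c "")).getD 0) (g c)) := by
  induction mid with
  | nil => intro g; rfl
  | cons row rest ih =>
    intro g
    simp only [List.foldl_cons]
    rw [pv_step_range n g row ops (hmid row (by simp)) ho]
    rw [ih (fun r hr => hmid r (by simp [hr]))]

theorem do_cephalopods_hw_spec : Claim_equal_do_cephalopods_hw := by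
  intro grid _ hpre
  obtain ⟨hne, hlastlen, hops, hrows, hr0⟩ := hpre
  unfold Spec_do_cephalopods_hw
  obtain ⟨r0, rest, rfl⟩ : ∃ r0 rest, grid = r0 :: rest := by
    cases grid with
    | nil => exact absurd rfl hne
    | cons a t => exact ⟨a, t, rfl⟩
  simp only [List.headD_cons] at hops hrows hr0 hlastlen
  rcases List.eq_nil_or_concat rest with hrest | ⟨mid, lastr, rfl⟩
  · -- single-row grid: Pre_ forces the row to be empty, both sides are 0
    subst hrest
    have hr0nil : r0 = [] := by
      cases r0 with
      | nil => rfl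
      | cons s t =>
        have h1 := hr0 s (by simp)
        have h2 := hops s (by simp)
        rcases h2 with h2 | h2 <;> subst h2 <;> simp [PySem.Int.ofStr?] at h1 <;>
          exact absurd h1 (by decide)
    subst hr0nil
    decide
  · -- grid = r0 :: (mid ++ [lastr])
    simp only [List.concat_eq_append] at hne hlastlen hops hrows ⊢
    have hlast_getLast : (r0 :: (mid ++ [lastr])).getLastD [] = lastr := by
      rw [List.getLastD_eq_getLast?,
        show (r0 :: (mid ++ [lastr])) = (r0 :: mid) ++ [lastr] by simp,
        List.getLast?_concat]
      rfl
    have hdropLast : (r0 :: (mid ++ [lastr])).dropLast = r0 :: mid := by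
      rw [show (r0 :: (mid ++ [lastr])) = (r0 :: mid) ++ [lastr] by simp,
        List.dropLast_concat]
    rw [hlast_getLast] at hlastlen
    rw [hdropLast] at hrows
    have hgrid0 : PySem.List.pyGetD (r0 :: (mid ++ [lastr])) 0 [] = r0 := by
      have h := PySem.List.pyGetD_natCast (r0 :: (mid ++ [lastr])) 0 ([] : List String)
      simp only [Int.natCast_zero] at h
      rw [h]
      rfl
    have hgridneg : PySem.List.pyGetD (r0 :: (mid ++ [lastr])) (-1) [] = lastr := by
      rw [pv_pyGetD_neg_one _ _ (by simp), hlast_getLast]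
    -- A side
    have hA : do_cephalopods_hw (r0 :: (mid ++ [lastr]))
        = ((List.range r0.length).map (fun c =>
            (PySem.List.pyRange 1 (((r0 :: (mid ++ [lastr])).length : Int) - 1)).foldl
              (fun acc row =>
                if lastr.getD c "" = "+" then
                  acc + (PySem.Int.ofStr? (PySem.List.pyGetD
                    (PySem.List.pyGetD (r0 :: (mid ++ [lastr])) row []) (c : Int) "")).getD 0
                else
                  acc * (PySem.Int.ofStr? (PySem.List.pyGetD
                    (PySem.List.pyGetD (r0 :: (mid ++ [lastr])) row []) (c : Int) "")).getD 0)
              ((PySem.Int.ofStr? (r0.getD c "")).getD 0))).sum := by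
      simp only [do_cephalopods_hw, hgrid0, hgridneg]
      rw [PySem.List.pyRange_one 0 (↑r0.length : Int)]
      rw [List.foldl_map]
      rw [PySem.List.foldl_add]
      simp only [zero_add, PySem.List.pyGetD_natCast, sub_zero,
        Int.toNat_natCast]
    -- B side
    have hB : do_cephalopods_hw_alt (r0 :: (mid ++ [lastr]))
        = ((List.range r0.length).map (fun c =>
            mid.foldl (fun a row =>
              if lastr.getD c "" = "+" then a + (PySem.Int.ofStr? (row.getD c "")).getD 0
              else a * (PySem.Int.ofStr? (row.getD c "")).getD 0)
            ((PySem.Int.ofStr? (r0.getD c "")).getD 0))).sum := by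
      simp only [do_cephalopods_hw_alt, hgrid0, hgridneg]
      rw [pv_slice_one_negone, List.dropLast_concat]
      rw [pv_map_eq_range r0 (fun x => (PySem.Int.ofStr? x).getD 0) ""]
      rw [pv_stream_eq_cols lastr mid r0.length
        (fun row hrow => (hrows row (by simp [hrow])).1) hlastlen]
    rw [hA, hB]
    congr 1
    apply List.map_congr_left
    intro c hc
    have hmlen : (r0 :: (mid ++ [lastr])).length = mid.length + 2 := by
      simp only [List.length_cons, List.length_append, List.length_nil]
    -- rewrite A's inner loop into a fold over the middle rows
    have hb : (((r0 :: (mid ++ [lastr])).length : Int) - 1) = (((r0 :: mid).length : Nat) : Int) := by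
      rw [hmlen]; simp only [List.length_cons]; push_cast; omega
    rw [hb]
    rw [PySem.List.foldl_congr_mem _ _ (fun acc j =>
        if lastr.getD c "" = "+" then
          acc + (PySem.Int.ofStr? (PySem.List.pyGetD
            (PySem.List.pyGetD (r0 :: mid) j []) (c : Int) "")).getD 0
        else
          acc * (PySem.Int.ofStr? (PySem.List.pyGetD
            (PySem.List.pyGetD (r0 :: mid) j []) (c : Int) "")).getD 0) _ ?_]
    · rw [PySem.List.foldl_pyRange_pyGetD' (r0 :: mid) ([] : List String)
          (fun acc rowl =>
            if lastr.getD c "" = "+" then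
              acc + (PySem.Int.ofStr? (PySem.List.pyGetD rowl (c : Int) "")).getD 0
            else
              acc * (PySem.Int.ofStr? (PySem.List.pyGetD rowl (c : Int) "")).getD 0)
          _ (by omega)]
      simp only [Int.toNat_one, List.drop_one, List.tail_cons, PySem.List.pyGetD_natCast]
    · intro acc j hj
      have hj' := PySem.List.mem_pyRange_one.mp hj
      have h0 : 0 ≤ j := by omega
      have hjlt : j < ((r0 :: mid).length : Int) := hj'.2
      have hjlt2 : j < ((r0 :: (mid ++ [lastr])).length : Int) := by
        rw [hmlen]; push_cast at hjlt ⊢; simp only [List.length_cons] at hjlt; omega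
      have hgg : PySem.List.pyGetD (r0 :: (mid ++ [lastr])) j []
          = PySem.List.pyGetD (r0 :: mid) j [] := by
        rw [PySem.List.pyGetD_eq_getElem _ _ h0 hjlt2,
            PySem.List.pyGetD_eq_getElem _ _ h0 hjlt]
        have hcons : (r0 :: (mid ++ [lastr])) = (r0 :: mid) ++ [lastr] := by simp
        simp only [hcons]
        rw [List.getElem_append_left]
      simp only [hgg]

-- ===== VERDICT (by name: the statement is the Claim_ definition above) =====
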